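-- pv_equiv track=rewrite | github.com/acien101/STBPackets | test/readtocsv.py | gen_checksum
-- ===== SOURCE A (Python) =====
-- def gen_checksum(data):
--   sum = 0
--   size = len(data)
--   even_size = size - size % 2
--   for i in range(0, even_size, 2):
--     sum += data[i] + 256 * data[i+1]
--   if even_size < size:
--     sum += data[size-1]
--   return sum
-- ===== SOURCE B (Python) =====
-- def gen_checksum(data):
--   total = 0
--   for i, x in enumerate(data):
--     total += x if i % 2 == 0 else 256 * x
--   return total
-- ===== Notes on version B (the rewrite author's own statement) =====
-- stated objective: simpler
-- what changed: Replaces the stride-2 pair loop plus trailing-odd-byte branch with one uniform pass that weights each element by its index parity (1 for even, 256 for odd), so no even_size computation or tail special case remains.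
import Mathlib
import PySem

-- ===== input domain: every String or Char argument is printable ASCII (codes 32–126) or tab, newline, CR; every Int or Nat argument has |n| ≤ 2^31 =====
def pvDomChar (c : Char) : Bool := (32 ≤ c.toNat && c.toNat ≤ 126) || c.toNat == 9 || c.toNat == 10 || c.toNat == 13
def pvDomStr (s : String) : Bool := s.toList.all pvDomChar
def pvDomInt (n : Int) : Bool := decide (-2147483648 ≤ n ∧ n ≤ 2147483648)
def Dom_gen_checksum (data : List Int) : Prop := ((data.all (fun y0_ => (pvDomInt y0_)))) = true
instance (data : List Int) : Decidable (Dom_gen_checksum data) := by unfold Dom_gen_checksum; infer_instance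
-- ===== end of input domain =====

-- B replaces A's stride-2 pair loop + trailing-odd-byte branch by one uniform
-- pass weighting each element by its index parity; same values, simpler shape.

-- ===== PORT A =====
def gen_checksum (data : List Int) : Int :=
  let size : Int := data.length
  let even_size : Int := size - PySem.Int.mod size 2
  let s : Int := (PySem.List.pyRange 0 even_size 2).foldl
    (fun acc i => acc + (PySem.List.pyGetD data i 0 + 256 * PySem.List.pyGetD data (i + 1) 0)) 0
  if even_size < size then s + PySem.List.pyGetD data (size - 1) 0 else s

-- ===== PORT B =====
def gen_checksum_alt (data : List Int) : Int :=
  (PySem.List.enumerate data 0).foldl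
    (fun total p => total + (if PySem.Int.mod p.1 2 = 0 then p.2 else 256 * p.2)) 0

-- ===== PRECONDITION & SPEC =====
def Spec_gen_checksum (data : List Int) (out : Int) : Prop := out = gen_checksum_alt data
instance (data : List Int) (out : Int) : Decidable (Spec_gen_checksum data out) := by unfold Spec_gen_checksum; infer_instance

-- ===== CLAIM (what is proved, stated in full; the proofs are below) =====
def Claim_equal_gen_checksum : Prop := ∀ (data : List Int), Dom_gen_checksum data → Spec_gen_checksum data (gen_checksum data)

-- ===== LEMMAS AND PROOFS =====

-- common recursive characterisation of the checksum: a + 256*b per pair, lone trailing element weight 1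
def pairSum : List Int → Int
  | [] => 0
  | [a] => a
  | a :: b :: rest => a + 256 * b + pairSum rest

-- shifting a nonnegative index past two cons cells (no range bound needed: both default to 0 out of range)
lemma pyGetD_cons₂ (a b : Int) (xs : List Int) (i : Int) (h0 : 0 ≤ i) :
    PySem.List.pyGetD (a :: b :: xs) (i + 2) 0 = PySem.List.pyGetD xs i 0 := by
  have ht : (i + 2).toNat = i.toNat + 2 := by omega
  simp only [PySem.List.pyGetD, PySem.List.pyGet?, PySem.List.pyIdx?, List.length_cons]
  split_ifs <;> first | (exfalso; omega) | simp [ht]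

-- the value accumulated by A's pair loop, phrased over Nat pair count
def pairIdxSum (xs : List Int) (m : Nat) : Int :=
  ((List.range m).map
    (fun (k : Nat) => PySem.List.pyGetD xs (2 * (k : Int)) 0
      + 256 * PySem.List.pyGetD xs (2 * (k : Int) + 1) 0)).sum

lemma pairIdxSum_cons₂ (a b : Int) (xs : List Int) (m : Nat) :
    pairIdxSum (a :: b :: xs) (m + 1) = a + 256 * b + pairIdxSum xs m := by
  simp only [pairIdxSum]
  rw [List.range_succ_eq_map]
  simp only [List.map_cons, List.map_map, List.sum_cons]
  have hhead : PySem.List.pyGetD (a :: b :: xs) (2 * ((0 : Nat) : Int)) 0 = a := by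
    rw [show (2 * ((0 : Nat) : Int)) = 0 by norm_num,
        PySem.List.pyGetD_eq_getElem _ _ le_rfl (by push_cast [List.length_cons]; omega)]
    simp
  have hhead' : PySem.List.pyGetD (a :: b :: xs) (2 * ((0 : Nat) : Int) + 1) 0 = b := by
    rw [show (2 * ((0 : Nat) : Int) + 1) = 1 by norm_num,
        PySem.List.pyGetD_eq_getElem _ _ (by norm_num) (by push_cast [List.length_cons]; omega)]
    simp
  rw [hhead, hhead']
  have hmap : ∀ k ∈ List.range m,
      ((fun (k : Nat) => PySem.List.pyGetD (a :: b :: xs) (2 * (k : Int)) 0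
                 + 256 * PySem.List.pyGetD (a :: b :: xs) (2 * (k : Int) + 1) 0) ∘ Nat.succ) k
      = (fun k : Nat => PySem.List.pyGetD xs (2 * (k : Int)) 0
                 + 256 * PySem.List.pyGetD xs (2 * (k : Int) + 1) 0) k := by
    intro k _
    simp only [Function.comp]
    have h2 : (2 * ((Nat.succ k : Nat) : Int) + 1) = (2 * (k : Int) + 1) + 2 := by push_cast; ring
    have h1 : (2 * ((Nat.succ k : Nat) : Int)) = 2 * (k : Int) + 2 := by push_cast; ring
    rw [h2, h1, pyGetD_cons₂ _ _ _ _ (by positivity), pyGetD_cons₂ _ _ _ _ (by positivity)]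
  rw [List.map_congr_left hmap]

-- A's closed shape: n/2 full pairs plus a weight-1 tail element when the length is odd
lemma genA_closed (data : List Int) :
    gen_checksum data = pairIdxSum data (data.length / 2)
      + (if data.length % 2 = 1 then PySem.List.pyGetD data ((data.length : Int) - 1) 0 else 0) := by
  simp only [gen_checksum]
  have hmod : PySem.Int.mod ((data.length : Int)) 2 = ((data.length % 2 : Nat) : Int) := by
    exact_mod_cast PySem.Int.mod_natCast data.length 2
  rw [PySem.List.foldl_add, hmod, PySem.List.pyRange_of_pos _ _ (by norm_num : (0:Int) < 2)]
  have hcnt : (if (0:Int) < (data.length : Int) - ((data.length % 2 : Nat) : Int)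
      then (((data.length : Int) - ((data.length % 2 : Nat) : Int) - 0 + 2 - 1) / 2).toNat else 0)
      = data.length / 2 := by
    split_ifs with h <;> omega
  rw [hcnt, List.map_map]
  have hmap : ∀ k ∈ List.range (data.length / 2),
      ((fun i => PySem.List.pyGetD data i 0 + 256 * PySem.List.pyGetD data (i + 1) 0)
        ∘ (fun k : Nat => (0 : Int) + 2 * (k : Int))) k
      = (fun k : Nat => PySem.List.pyGetD data (2 * (k : Int)) 0
          + 256 * PySem.List.pyGetD data (2 * (k : Int) + 1) 0) k := by
    intro k _; simp [Function.comp]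
  rw [List.map_congr_left hmap]
  simp only [pairIdxSum, zero_add]
  by_cases h2 : data.length % 2 = 1
  · rw [if_pos (by omega), if_pos h2]
  · rw [if_neg (by omega), if_neg h2, add_zero]
lemma genA_eq_pairSum (data : List Int) : gen_checksum data = pairSum data := by
  induction data using pairSum.induct with
  | case1 => decide
  | case2 a =>
      rw [genA_closed]
      norm_num [pairIdxSum, pairSum, PySem.List.pyGetD, PySem.List.pyGet?, PySem.List.pyIdx?]
  | case3 a b rest ih =>
      rw [genA_closed] at ih ⊢
      simp only [List.length_cons, pairSum]
      have hdiv : (rest.length + 1 + 1) / 2 = rest.length / 2 + 1 := by omega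
      have hm : (rest.length + 1 + 1) % 2 = rest.length % 2 := by omega
      rw [hdiv, hm, pairIdxSum_cons₂, ← ih]
      by_cases hodd : rest.length % 2 = 1
      · have htail : PySem.List.pyGetD (a :: b :: rest) (((rest.length + 1 + 1 : Nat) : Int) - 1) 0
            = PySem.List.pyGetD rest ((rest.length : Int) - 1) 0 := by
          have h1 : ((rest.length + 1 + 1 : Nat) : Int) - 1 = ((rest.length : Int) - 1) + 2 := by
            push_cast; ring
          rw [h1, pyGetD_cons₂ _ _ _ _ (by omega)]
        rw [if_pos hodd, if_pos hodd, htail]; ring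
      · rw [if_neg hodd, if_neg hodd]; ring

lemma genB_general (data : List Int) : ∀ (s acc : Int), PySem.Int.mod s 2 = 0 →
    (PySem.List.enumerate data s).foldl
      (fun total p => total + (if PySem.Int.mod p.1 2 = 0 then p.2 else 256 * p.2)) acc
    = acc + pairSum data := by
  induction data using pairSum.induct with
  | case1 => intro s acc _; simp [PySem.List.enumerate, pairSum]
  | case2 a =>
      intro s acc hs
      simp only [PySem.List.enumerate, List.foldl_cons, List.foldl_nil,
        pairSum]
      rw [if_pos hs]
  | case3 a b rest ih =>
      intro s acc hs
      have hse : s % 2 = 0 := by rw [← PySem.Int.mod_eq_emod_of_pos (by omega : (0:Int) < 2)]; exact hs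
      have h1 : PySem.Int.mod (s + 1) 2 ≠ 0 := by
        rw [PySem.Int.mod_eq_emod_of_pos (by omega : (0:Int) < 2)]; omega
      have h2 : PySem.Int.mod (s + 1 + 1) 2 = 0 := by
        rw [PySem.Int.mod_eq_emod_of_pos (by omega : (0:Int) < 2)]; omega
      rw [PySem.List.enumerate_cons, PySem.List.enumerate_cons]
      simp only [List.foldl_cons]
      rw [if_pos hs, if_neg h1, ih (s + 1 + 1) _ h2, pairSum]
      ring

lemma genB_eq_pairSum (data : List Int) : gen_checksum_alt data = pairSum data := by
  have h := genB_general data 0 0 (by decide)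
  simpa [gen_checksum_alt] using h

-- ===== VERDICT (by name: the statement is the Claim_ definition above) =====
theorem gen_checksum_spec : Claim_equal_gen_checksum := by
  intro data _
  unfold Spec_gen_checksum
  rw [genA_eq_pairSum, genB_eq_pairSum]
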